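-- pv_equiv track=rewrite | github.com/GundalaNikhil/DSA | generate_bitwise_all_correct.py | bit008_solution
-- ===== SOURCE A (Python) =====
-- def bit008_solution(a: list, k: int) -> int:
--     """BIT-008: Maximize OR With K Picks"""
--     if k >= 30:
--         result = 0
--         for x in a:
--             result |= x
--         return result
--
--     result = 0
--     remaining = k
--     for bit in range(30, -1, -1):
--         or_with_bit = result | (1 << bit)
--         count = sum(1 for x in a if (x & or_with_bit) == or_with_bit)
--         if count >= remaining:
--             result = or_with_bit
--     return result
-- ===== SOURCE B (Python) =====
-- def bit008_solution(a: list, k: int) -> int: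
--     """BIT-008: Maximize OR With K Picks"""
--     if k >= 30:
--         result = 0
--         for x in a:
--             result |= x
--         return result
--     return _pick(30, a, k)
--
--
-- def _pick(bit: int, cands: list, k: int) -> int:
--     # Recursive descent over bits, narrowing the candidate list; the answer
--     # is assembled on the way back up (mask | rest).
--     if bit < 0:
--         return 0
--     mask = 1 << bit
--     kept = [c for c in cands if c & mask]
--     if len(kept) >= k:
--         return mask | _pick(bit - 1, kept, k)
--     return _pick(bit - 1, cands, k)
-- ===== Notes on version B (the rewrite author's own statement) =====
-- stated objective: alternative
-- what changed: Replaces A's iterative accumulate-and-rescan loop (testing each element against the full accumulated mask result|(1<<bit)) by a recursive per-bit descent that narrows a candidate list to supersets of the bits taken so far, tests only the single current bit, and assembles the answer back-to-front on return.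
import Mathlib
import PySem

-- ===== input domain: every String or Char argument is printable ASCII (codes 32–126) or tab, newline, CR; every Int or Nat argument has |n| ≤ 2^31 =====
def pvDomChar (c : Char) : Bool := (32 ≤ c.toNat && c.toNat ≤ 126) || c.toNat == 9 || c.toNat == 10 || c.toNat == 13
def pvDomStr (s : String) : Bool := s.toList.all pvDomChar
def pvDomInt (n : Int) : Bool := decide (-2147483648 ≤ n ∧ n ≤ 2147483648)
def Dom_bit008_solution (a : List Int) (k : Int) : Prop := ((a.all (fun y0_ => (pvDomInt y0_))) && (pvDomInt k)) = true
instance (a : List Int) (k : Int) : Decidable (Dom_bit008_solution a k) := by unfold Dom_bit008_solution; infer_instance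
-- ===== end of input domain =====

-- B replaces A's accumulate-and-rescan loop by a recursive per-bit descent that narrows a
-- candidate list and assembles the answer back-to-front; objective: alternative.

-- ===== PORT A =====
-- loop body of A's `for bit in range(30, -1, -1)` (result is the fold state)
def pvStepA (a : List Int) (k : Int) (result : Int) (bit : Int) : Int :=
  let orWithBit := PySem.Int.bor result ((1 : Int) <<< bit.toNat)
  let count := (a.filter (fun x => PySem.Int.band x orWithBit == orWithBit)).length
  if k ≤ (count : Int) then orWithBit else result

def bit008_solution (a : List Int) (k : Int) : Int :=
  if 30 ≤ k then
    a.foldl (fun result x => PySem.Int.bor result x) 0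
  else
    (PySem.List.pyRange 30 (-1) (-1)).foldl (pvStepA a k) 0

-- ===== PORT B =====
-- B's helper `_pick(bit, cands, k)`: the Nat argument is bit+1 (0 plays Python's `bit < 0`)
def pvPick (k : Int) : Nat → List Int → Int
  | 0, _ => 0
  | n + 1, cands =>
    let mask := (1 : Int) <<< n
    let kept := cands.filter (fun c => !(PySem.Int.band c mask == 0))
    if k ≤ (kept.length : Int) then PySem.Int.bor mask (pvPick k n kept)
    else pvPick k n cands

def bit008_solution_alt (a : List Int) (k : Int) : Int :=
  if 30 ≤ k then
    a.foldl (fun result x => PySem.Int.bor result x) 0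
  else
    pvPick k 31 a

-- ===== PRECONDITION & SPEC =====
def Spec_bit008_solution (a : List Int) (k : Int) (out : Int) : Prop := out = bit008_solution_alt a k
instance (a : List Int) (k : Int) (out : Int) : Decidable (Spec_bit008_solution a k out) := by unfold Spec_bit008_solution; infer_instance

-- ===== CLAIM (what is proved, stated in full; the proofs are below) =====
def Claim_equal_bit008_solution : Prop := ∀ (a : List Int) (k : Int), Dom_bit008_solution a k → Spec_bit008_solution a k (bit008_solution a k)

-- ===== LEMMAS AND PROOFS =====

-- the i-th two's-complement bit of an arbitrary integer
def pvBitOf (x : Int) (i : Nat) : Bool :=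
  if 0 ≤ x then x.toNat.testBit i else !(((-x).toNat - 1).testBit i)

theorem pvShift1 (n : Nat) : (1 : Int) <<< n = ((2 ^ n : Nat) : Int) := by
  simp [Int.shiftLeft_eq]

-- Nat: m &&& n = n ↔ every bit of n is a bit of m
theorem pvNatAndEq (m n : Nat) :
    (m &&& n = n) ↔ (∀ i, n.testBit i = true → m.testBit i = true) := by
  constructor
  · intro h i hi
    have := congrArg (fun t => Nat.testBit t i) h
    simp only [Nat.testBit_and] at this
    cases hm : m.testBit i <;> simp [hm] at this <;> simp_all
  · intro h
    refine Nat.eq_of_testBit_eq fun i => ?_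
    simp only [Nat.testBit_and]
    cases hn : n.testBit i
    · simp
    · simp [h i hn]

-- Nat: m &&& n = 0 ↔ no bit of m is a bit of n
theorem pvNatAndZero (m n : Nat) :
    (m &&& n = 0) ↔ (∀ i, m.testBit i = true → n.testBit i = false) := by
  constructor
  · intro h i hi
    have := congrArg (fun t => Nat.testBit t i) h
    simp only [Nat.testBit_and, Nat.zero_testBit] at this
    simpa [hi] using this
  · intro h
    refine Nat.eq_of_testBit_eq fun i => ?_
    simp only [Nat.testBit_and, Nat.zero_testBit]
    cases hm : m.testBit i
    · simp
    · simp [h i hm]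

-- the central characterisation: for s ≥ 0, x & s == s iff every bit of s is a bit of x
theorem pvBandEqSelf (x s : Int) (hs : 0 ≤ s) :
    (PySem.Int.band x s = s) ↔ (∀ i, s.toNat.testBit i = true → pvBitOf x i = true) := by
  by_cases hx : 0 ≤ x
  · rw [PySem.Int.band_of_nonneg hx hs]
    have hcast : (((x.toNat &&& s.toNat : Nat) : Int) = s) ↔ (x.toNat &&& s.toNat = s.toNat) := by
      omega
    rw [hcast, pvNatAndEq]
    simp [pvBitOf, hx]
  · have hxneg : x < 0 := by omega
    have hband : PySem.Int.band x s = ((s.toNat - (s.toNat &&& ((-x).toNat - 1)) : Nat) : Int) := by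
      simp [PySem.Int.band, hx, hs]
    rw [hband]
    have hle : s.toNat &&& ((-x).toNat - 1) ≤ s.toNat := Nat.and_le_left
    have hcast : (((s.toNat - (s.toNat &&& ((-x).toNat - 1)) : Nat) : Int) = s)
        ↔ (s.toNat &&& ((-x).toNat - 1) = 0) := by omega
    rw [hcast, pvNatAndZero]
    simp only [pvBitOf, hx, if_false]
    constructor
    · intro h i hi
      simp [h i hi]
    · intro h i hi
      have := h i hi
      simpa using this

-- x & (r|m) == r|m splits into the two smaller conditions (r, m ≥ 0)
theorem pvBandSplit (x r m : Int) (hr : 0 ≤ r) (hm : 0 ≤ m) :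
    (PySem.Int.band x (PySem.Int.bor r m) = PySem.Int.bor r m)
      ↔ (PySem.Int.band x r = r ∧ PySem.Int.band x m = m) := by
  have hb : PySem.Int.bor r m = ((r.toNat ||| m.toNat : Nat) : Int) := PySem.Int.bor_of_nonneg hr hm
  have hbnn : 0 ≤ PySem.Int.bor r m := by rw [hb]; positivity
  rw [pvBandEqSelf x _ hbnn, pvBandEqSelf x r hr, pvBandEqSelf x m hm]
  have ht : (PySem.Int.bor r m).toNat = r.toNat ||| m.toNat := by rw [hb]; omega
  rw [ht]
  simp only [Nat.testBit_or, Bool.or_eq_true, or_imp, forall_and]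

-- a single-bit mask: x & 2^n is either 0 or 2^n
theorem pvBandSingle (x : Int) (n : Nat) :
    PySem.Int.band x ((1 : Int) <<< n) = 0 ∨ PySem.Int.band x ((1 : Int) <<< n) = (1 : Int) <<< n := by
  rw [pvShift1]
  by_cases hx : 0 ≤ x
  · rw [PySem.Int.band_of_nonneg hx (by positivity)]
    simp only [Int.toNat_natCast]
    have h2 := Nat.and_two_pow x.toNat n
    cases hb : x.toNat.testBit n
    · left; rw [hb] at h2; simp at h2; simp [h2]
    · right; rw [hb] at h2; simp at h2; simp [h2]
  · have hband : PySem.Int.band x ((2 ^ n : Nat) : Int)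
        = ((((2 ^ n : Nat) : Int).toNat - (((2 ^ n : Nat) : Int).toNat &&& ((-x).toNat - 1)) : Nat) : Int) := by
      simp [PySem.Int.band, hx]
    rw [hband]
    simp only [Int.toNat_natCast]
    have h2 := Nat.two_pow_and ((-x).toNat - 1) n
    cases hb : ((-x).toNat - 1).testBit n
    · right; rw [hb] at h2; simp at h2; simp [h2]
    · left; rw [hb] at h2; simp at h2; simp [h2]

-- associativity of ||| on nonnegative integers, via Nat
theorem pvBorAssoc (x y z : Int) (hx : 0 ≤ x) (hy : 0 ≤ y) (hz : 0 ≤ z) :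
    PySem.Int.bor (PySem.Int.bor x y) z = PySem.Int.bor x (PySem.Int.bor y z) := by
  rw [PySem.Int.bor_of_nonneg hx hy, PySem.Int.bor_of_nonneg hy hz,
      PySem.Int.bor_of_nonneg (by positivity) hz, PySem.Int.bor_of_nonneg hx (by positivity)]
  simp [Nat.or_assoc]

-- hence `x & mask ≠ 0` (B's truthiness test) agrees with `x & mask == mask` (A's test)
theorem pvSingleTest (x : Int) (n : Nat) :
    (!(PySem.Int.band x ((1 : Int) <<< n) == 0))
      = (PySem.Int.band x ((1 : Int) <<< n) == (1 : Int) <<< n) := by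
  have hpos : (0 : Int) < (1 : Int) <<< n := by rw [pvShift1]; positivity
  rcases pvBandSingle x n with h | h <;> simp [h] <;> omega

-- pvPick always returns a nonnegative value
theorem pvPick_nonneg (k : Int) : ∀ (n : Nat) (cands : List Int), 0 ≤ pvPick k n cands := by
  intro n
  induction n with
  | zero => intro cands; simp [pvPick]
  | succ m ih =>
    intro cands
    simp only [pvPick]
    split
    · have h1 : (0:Int) ≤ (1 : Int) <<< m := by rw [pvShift1]; positivity
      rw [PySem.Int.bor_of_nonneg h1 (ih _)]
      positivity
    · exact ih _

-- the range list of A's loop, cut to its last n elements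
theorem pvRange_tail (n : Nat) (hn : n ≤ 31) :
    PySem.List.pyRange ((n : Int) - 1) (-1) (-1)
      = (List.range n).reverse.map (fun i => (i : Int)) := by
  interval_cases n <;> decide

-- main correspondence: A's loop over bits n-1 … 0 starting from result r equals
-- r ||| pvPick on the candidates that are supersets of r
theorem pvMain (a : List Int) (k : Int) :
    ∀ (n : Nat) (r : Int), 0 ≤ r →
      ((List.range n).reverse.map (fun i => (i : Int))).foldl (pvStepA a k) r
        = PySem.Int.bor r (pvPick k n (a.filter (fun x => PySem.Int.band x r == r))) := by
  intro n
  induction n with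
  | zero => intro r hr; simp [pvPick]
  | succ m ih =>
    intro r hr
    have hm : (0:Int) ≤ (1 : Int) <<< m := by rw [pvShift1]; positivity
    have hsel :
        (a.filter (fun x => PySem.Int.band x r == r)).filter
            (fun c => !(PySem.Int.band c ((1 : Int) <<< m) == 0))
          = a.filter (fun x =>
              PySem.Int.band x (PySem.Int.bor r ((1 : Int) <<< m))
                == PySem.Int.bor r ((1 : Int) <<< m)) := by
      rw [List.filter_filter]
      refine List.filter_congr fun x _ => ?_
      rw [pvSingleTest]
      have hsp := pvBandSplit x r ((1 : Int) <<< m) hr hm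
      rw [Bool.eq_iff_iff]
      simp only [Bool.and_eq_true, beq_iff_eq]
      rw [hsp]
      tauto
    have hcons : (List.range (m + 1)).reverse.map (fun i => (i : Int))
        = ((m : Int)) :: (List.range m).reverse.map (fun i => (i : Int)) := by
      simp [List.range_succ]
    rw [hcons]
    simp only [List.foldl_cons]
    have htn : ((m : Int)).toNat = m := by omega
    by_cases hc : k ≤ (((a.filter (fun x =>
        PySem.Int.band x (PySem.Int.bor r ((1 : Int) <<< m))
          == PySem.Int.bor r ((1 : Int) <<< m))).length : Nat) : Int)
    · have hA : pvStepA a k r (m : Int) = PySem.Int.bor r ((1 : Int) <<< m) := by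
        simp only [pvStepA, htn]
        rw [if_pos hc]
      have hB : pvPick k (m + 1) (a.filter (fun x => PySem.Int.band x r == r))
          = PySem.Int.bor ((1 : Int) <<< m)
              (pvPick k m (a.filter (fun x =>
                PySem.Int.band x (PySem.Int.bor r ((1 : Int) <<< m))
                  == PySem.Int.bor r ((1 : Int) <<< m)))) := by
        simp only [pvPick, hsel]
        rw [if_pos hc]
      rw [hA, hB]
      have hrnn : 0 ≤ PySem.Int.bor r ((1 : Int) <<< m) := by
        rw [PySem.Int.bor_of_nonneg hr hm]; positivity
      rw [ih _ hrnn]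
      have hp := pvPick_nonneg k m (a.filter (fun x =>
        PySem.Int.band x (PySem.Int.bor r ((1 : Int) <<< m))
          == PySem.Int.bor r ((1 : Int) <<< m)))
      exact pvBorAssoc _ _ _ hr hm hp
    · have hA : pvStepA a k r (m : Int) = r := by
        simp only [pvStepA, htn]
        rw [if_neg hc]
      have hB : pvPick k (m + 1) (a.filter (fun x => PySem.Int.band x r == r))
          = pvPick k m (a.filter (fun x => PySem.Int.band x r == r)) := by
        simp only [pvPick, hsel]
        rw [if_neg hc]
      rw [hA, hB]
      exact ih r hr

-- ===== VERDICT (by name: the statement is the Claim_ definition above) =====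
theorem bit008_solution_spec : Claim_equal_bit008_solution := by
  intro a k _
  unfold Spec_bit008_solution
  unfold bit008_solution bit008_solution_alt
  by_cases h : 30 ≤ k
  · simp [h]
  · simp only [h, if_false]
    have hrange : PySem.List.pyRange 30 (-1) (-1)
        = (List.range 31).reverse.map (fun i => (i : Int)) := by
      have := pvRange_tail 31 (by norm_num)
      norm_num at this
      exact this
    rw [hrange, pvMain a k 31 0 le_rfl]
    have h0 : a.filter (fun x => PySem.Int.band x 0 == 0) = a := by simp
    rw [h0]
    rw [PySem.Int.bor_comm]
    simp
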